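-- pv_equiv track=rewrite | github.com/David-Fuq/CupiPlagio | FuquenFinal/proyectos/202510_ISIS1221_33_N3_PROY/Mache - Laura Sofia Gonzalez Mendoza - tazo/cupitube.py | buscar_cupituber_mas_antiguo
-- ===== SOURCE A (Python) =====
-- def buscar_cupituber_mas_antiguo(cupitube: dict) -> dict:
--     """
--     Busca al CupiTuber más antiguo con base en la fecha de inicio (started).
--
--     Parámetros:
--         cupitube (dict): Diccionario con la información de los CupiTubers.
--
--     Retorno:
--         dict: Diccionario con la información del CupiTuber más antiguo.
--               En caso de empate (misma fecha de inicio o started), se retorna el primer CupiTuber encontrado.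
--
--     Nota:
--         Las fechas de inicio de los CupiTubers ("started") en el dataset están en el formato "YYYY-MM-DD" (Año-Mes-Día).
--         En Python, este formato permite que las fechas puedan compararse directamente como strings, ya que el orden lexicográfico coincide con el orden cronológico.
--
--         Ejemplos de comparaciones:
--             "2005-02-15" < "2006-06-10"  # → True (Porque 2005 es anterior a 2006)
--             "2010-08-23" > "2009-12-31"  # → True (Porque 2010 es posterior a 2009)
--             "2015-03-10" < "2015-03-20"  # → True (Mismo año y mes, pero el día 10 es anterior al día 20)
--     """
--     #TODO 4: Implemente la función tal y como se describe en la documentación.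
--     antiguo = None
--     mas_antiguo = None
--
--     for list_cupitubers in cupitube.values():
--         for cupituber in list_cupitubers:
--             if antiguo == None:
--                 antiguo = cupituber["started"]
--                 mas_antiguo = cupituber
--             elif cupituber["started"] < antiguo:
--                 antiguo = cupituber["started"]
--                 mas_antiguo = cupituber
--
--     return mas_antiguo
-- ===== SOURCE B (Python) =====
-- def buscar_cupituber_mas_antiguo(cupitube: dict) -> dict:
--     todos = []
--     for lst in cupitube.values():
--         todos.extend(lst)
--     if not todos:
--         return None
--     return sorted(todos, key=lambda c: c["started"])[0]
-- ===== Notes on version B (the rewrite author's own statement) =====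
-- stated objective: alternative
-- what changed: Replaces the nested-loop running-minimum with flatten-then-stable-sort-by-'started' and take the first element (stability reproduces first-on-tie).
import Mathlib
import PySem

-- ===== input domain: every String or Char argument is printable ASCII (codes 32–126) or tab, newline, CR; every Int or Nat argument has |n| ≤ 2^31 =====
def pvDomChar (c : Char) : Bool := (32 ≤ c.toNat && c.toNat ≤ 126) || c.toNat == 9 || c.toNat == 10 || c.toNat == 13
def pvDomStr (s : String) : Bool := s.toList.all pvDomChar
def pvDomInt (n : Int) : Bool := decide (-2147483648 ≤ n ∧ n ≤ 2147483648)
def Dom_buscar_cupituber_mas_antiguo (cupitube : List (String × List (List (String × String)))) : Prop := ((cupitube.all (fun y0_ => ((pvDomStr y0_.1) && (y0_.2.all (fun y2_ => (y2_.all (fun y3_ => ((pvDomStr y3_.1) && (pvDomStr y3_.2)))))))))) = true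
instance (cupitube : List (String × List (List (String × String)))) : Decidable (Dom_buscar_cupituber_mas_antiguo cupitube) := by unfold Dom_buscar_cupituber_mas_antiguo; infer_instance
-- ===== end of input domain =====

-- B replaces A's nested-loop running minimum by flatten + stable sort on "started" + first element (alternative decomposition, not faster).

-- cupituber["started"]: first-match association-list lookup (the dict convention); total form with default,
-- exact under Pre_ (every cupituber carries a "started" key).
def pvStarted (c : List (String × String)) : String :=
  (List.lookup "started" c).getD ""

-- ===== PORT A =====
-- one loop step of A's body (branch order as in the Python)
def pvStepA (st : Option String × List (String × String)) (c : List (String × String)) :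
    Option String × List (String × String) :=
  match st.1 with
  | none => (some (pvStarted c), c)
  | some a => if pvStarted c < a then (some (pvStarted c), c) else st

def buscar_cupituber_mas_antiguo (cupitube : List (String × List (List (String × String)))) : List (String × String) :=
  (cupitube.foldl (fun st kv => kv.2.foldl pvStepA st)
    ((none : Option String), ([] : List (String × String)))).2

-- ===== PORT B =====
def buscar_cupituber_mas_antiguo_alt (cupitube : List (String × List (List (String × String)))) : List (String × String) :=
  let todos := cupitube.foldl (fun acc kv => acc ++ kv.2) []
  -- sorted(todos, key=...)[0]; index 0 is total under Pre_ (todos nonempty)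
  (PySem.List.sorted todos pvStarted false).headD []

-- ===== PRECONDITION & SPEC =====
-- Pre_ excludes inputs where the Python A does not return a dict: an empty collection of cupitubers
-- (A returns None, no value of the declared type) and a cupituber without a "started" key (A raises KeyError).
def Pre_buscar_cupituber_mas_antiguo (cupitube : List (String × List (List (String × String)))) : Prop :=
  (cupitube.any (fun kv => !kv.2.isEmpty)) = true ∧
  ∀ kv ∈ cupitube, ∀ c ∈ kv.2, (List.lookup "started" c).isSome = true
instance (cupitube : List (String × List (List (String × String)))) : Decidable (Pre_buscar_cupituber_mas_antiguo cupitube) := by unfold Pre_buscar_cupituber_mas_antiguo; infer_instance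

def pvWitness_buscar_cupituber_mas_antiguo : (List (String × List (List (String × String)))) :=
  [("a", [[("started", "2020-01-01"), ("name", "x")]])]

def Spec_buscar_cupituber_mas_antiguo (cupitube : List (String × List (List (String × String)))) (out : List (String × String)) : Prop := out = buscar_cupituber_mas_antiguo_alt cupitube
instance (cupitube : List (String × List (List (String × String)))) (out : List (String × String)) : Decidable (Spec_buscar_cupituber_mas_antiguo cupitube out) := by unfold Spec_buscar_cupituber_mas_antiguo; infer_instance

-- ===== CLAIM (what is proved, stated in full; the proofs are below) =====
def Claim_equal_buscar_cupituber_mas_antiguo : Prop := ∀ (cupitube : List (String × List (List (String × String)))), Dom_buscar_cupituber_mas_antiguo cupitube → Pre_buscar_cupituber_mas_antiguo cupitube → Spec_buscar_cupituber_mas_antiguo cupitube (buscar_cupituber_mas_antiguo cupitube)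

-- ===== LEMMAS AND PROOFS =====

-- the state A maintains is exactly (key of head, head) of the insertion-sorted prefix
def pvStateOf (ys : List (List (String × String))) : Option String × List (String × String) :=
  match ys with
  | [] => (none, [])
  | m :: _ => (some (pvStarted m), m)

theorem pvStateOf_insertBy (x : List (String × String)) (ys : List (List (String × String))) :
    pvStateOf (PySem.List.insertBy (fun a b => decide (pvStarted a < pvStarted b)) x ys)
      = pvStepA (pvStateOf ys) x := by
  cases ys with
  | nil => rfl
  | cons y t =>
      show pvStateOf (if decide (pvStarted x < pvStarted y) = true then _ else _) = _
      by_cases h : pvStarted x < pvStarted y <;> simp [h, pvStateOf, pvStepA]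

theorem pvStateOf_foldl (xs : List (List (String × String))) :
    ∀ ys, pvStateOf (xs.foldl (fun acc x =>
        PySem.List.insertBy (fun a b => decide (pvStarted a < pvStarted b)) x acc) ys)
      = xs.foldl pvStepA (pvStateOf ys) := by
  induction xs with
  | nil => intro ys; rfl
  | cons x t ih =>
      intro ys
      simp only [List.foldl_cons, ih, pvStateOf_insertBy]

theorem pvFoldl_append (cupitube : List (String × List (List (String × String)))) :
    ∀ acc : List (List (String × String)),
      cupitube.foldl (fun acc kv => acc ++ kv.2) acc = acc ++ (cupitube.map (·.2)).flatten := by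
  induction cupitube with
  | nil => simp
  | cons kv t ih => intro acc; simp [ih, List.append_assoc]

-- ===== VERDICT (by name: the statement is the Claim_ definition above) =====
theorem buscar_cupituber_mas_antiguo_spec : Claim_equal_buscar_cupituber_mas_antiguo := by
  intro cupitube _ _
  unfold Spec_buscar_cupituber_mas_antiguo
  unfold buscar_cupituber_mas_antiguo buscar_cupituber_mas_antiguo_alt
  rw [pvFoldl_append, List.nil_append]
  show (List.foldl (fun st kv => List.foldl pvStepA st kv.2) (none, []) cupitube).2
      = (PySem.List.sorted ((cupitube.map (·.2)).flatten) pvStarted false).headD []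
  rw [show (PySem.List.sorted ((cupitube.map (·.2)).flatten) pvStarted false)
      = ((cupitube.map (·.2)).flatten).foldl (fun acc x =>
          PySem.List.insertBy (fun a b => decide (pvStarted a < pvStarted b)) x acc) [] from
    PySem.List.sorted_eq_foldl_insertBy _ _]
  rw [show List.foldl (fun st kv => List.foldl pvStepA st kv.2) ((none : Option String), ([] : List (String × String))) cupitube
      = (cupitube.map (·.2)).foldl (fun st l => l.foldl pvStepA st) (none, []) from
    List.foldl_map.symm]
  rw [← List.foldl_flatten]
  rw [show ((cupitube.map (·.2)).flatten).foldl pvStepA (none, [])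
      = pvStateOf (((cupitube.map (·.2)).flatten).foldl (fun acc x =>
          PySem.List.insertBy (fun a b => decide (pvStarted a < pvStarted b)) x acc) []) from
    (pvStateOf_foldl _ []).symm]
  cases ((cupitube.map (·.2)).flatten).foldl (fun acc x =>
      PySem.List.insertBy (fun a b => decide (pvStarted a < pvStarted b)) x acc) [] with
  | nil => rfl
  | cons m t => rfl
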